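-- pv_equiv track=rewrite | github.com/DvirAsaf/interview_question_python | q2.py | max_non_overlapping_pairs
-- ===== SOURCE A (Python) =====
-- def max_non_overlapping_pairs(arr):
--     # Find the pair with a maximum sum
--     max_sum = float('-inf')
--     for i in range(len(arr) - 1):
--         if arr[i] + arr[i + 1] > max_sum:
--             max_sum = arr[i] + arr[i + 1]
--
--     # Count the number of non-overlapping pairs with the maximum sum
--     count = 0
--     i = 0
--     while i < len(arr) - 1:
--         x = arr[i]
--         y = arr[i + 1]
--         if (x + y) == max_sum:
--             count += 1
--             i += 2
--         else:
--             i += 1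
--
--     return count
-- ===== SOURCE B (Python) =====
-- def max_non_overlapping_pairs(arr):
--     # Run-length formulation: within each maximal run of L consecutive
--     # adjacent-pair sums equal to the maximum, exactly (L + 1) // 2
--     # non-overlapping pairs fit; sum that over the runs in one pass.
--     sums = [x + y for x, y in zip(arr, arr[1:])]
--     if not sums:
--         return 0
--     m = max(sums)
--     total = 0
--     run = 0
--     for s in sums:
--         if s == m:
--             run += 1
--         else:
--             total += (run + 1) // 2
--             run = 0
--     return total + (run + 1) // 2
-- ===== Notes on version B (the rewrite author's own statement) =====
-- stated objective: alternative
-- what changed: A greedily walks indices with a while-loop (i+=2 on a match, i+=1 otherwise); B instead uses a closed-form per-run count: one run-length pass over the adjacent-pair sums adds ceil(L/2) for each maximal run of L consecutive max-sum positions, with no cursor or index skipping.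
import Mathlib
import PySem

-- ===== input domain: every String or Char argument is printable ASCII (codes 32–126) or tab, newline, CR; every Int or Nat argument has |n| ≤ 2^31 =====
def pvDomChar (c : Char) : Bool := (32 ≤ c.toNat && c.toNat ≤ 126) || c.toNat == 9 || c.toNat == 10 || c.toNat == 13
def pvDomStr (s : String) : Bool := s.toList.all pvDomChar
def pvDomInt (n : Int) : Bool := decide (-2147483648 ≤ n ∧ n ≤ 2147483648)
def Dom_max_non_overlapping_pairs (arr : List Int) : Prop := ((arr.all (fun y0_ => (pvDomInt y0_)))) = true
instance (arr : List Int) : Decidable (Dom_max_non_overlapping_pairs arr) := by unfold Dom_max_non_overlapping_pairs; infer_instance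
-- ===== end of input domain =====

-- B replaces A's greedy index-walking while-loop by a run-length formulation:
-- one pass over the adjacent-pair sums adding ceil(L/2) per maximal run of
-- consecutive max-sum positions (alternative algorithm, same O(n) cost).


-- ===== PORT A =====
-- max_sum starts at float('-inf'): modelled as `none` (anything > -inf; nothing == -inf).
-- The while loop `i < len(arr) - 1` (count at a matching pair then i += 2, else i += 1):
-- structural recursion on i.  arr[i] / arr[i+1] are always in range (i+1 < len), so getD is exact.
def pvCountA (arr : List Int) (ms : Option Int) (i : Nat) : Int :=
  if _h : i + 1 < arr.length then
    if some (arr.getD i 0 + arr.getD (i + 1) 0) = ms then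
      1 + pvCountA arr ms (i + 2)
    else
      pvCountA arr ms (i + 1)
  else 0
termination_by arr.length - i

def max_non_overlapping_pairs (arr : List Int) : Int :=
  let ms := (List.range (arr.length - 1)).foldl
    (fun acc i =>
      match acc with
      | none => some (arr.getD i 0 + arr.getD (i + 1) 0)
      | some m => if arr.getD i 0 + arr.getD (i + 1) 0 > m
                  then some (arr.getD i 0 + arr.getD (i + 1) 0) else acc) none
  pvCountA arr ms 0

-- ===== PORT B =====
-- Transliteration of Source B: sums via zip(arr, arr[1:]), max(sums), then one
-- run-length pass with state (total, run), finishing with total + (run+1)//2.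
def max_non_overlapping_pairs_alt (arr : List Int) : Int :=
  let sums := List.zipWith (fun x y => x + y) arr (arr.drop 1)
  match PySem.List.max? sums (fun y => y) with
  | none => 0   -- `if not sums: return 0`
  | some m =>
    let st := sums.foldl
      (fun st s => if s == m then (st.1, st.2 + 1)
                   else (st.1 + (((st.2 + 1) / 2 : Nat) : Int), (0 : Nat)))
      ((0 : Int), (0 : Nat))
    st.1 + (((st.2 + 1) / 2 : Nat) : Int)

-- ===== PRECONDITION & SPEC =====
def Spec_max_non_overlapping_pairs (arr : List Int) (out : Int) : Prop := out = max_non_overlapping_pairs_alt arr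
instance (arr : List Int) (out : Int) : Decidable (Spec_max_non_overlapping_pairs arr out) := by unfold Spec_max_non_overlapping_pairs; infer_instance

-- ===== CLAIM (what is proved, stated in full; the proofs are below) =====
def Claim_equal_max_non_overlapping_pairs : Prop := ∀ (arr : List Int), Dom_max_non_overlapping_pairs arr → Spec_max_non_overlapping_pairs arr (max_non_overlapping_pairs arr)

-- ===== LEMMAS AND PROOFS =====

-- the adjacent-pair-sum list, index form (A's view of the data)
def pvSums (arr : List Int) : List Int :=
  (List.range (arr.length - 1)).map (fun p => arr.getD p 0 + arr.getD (p + 1) 0)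

-- greedy on the sums list (abstract form of A's while loop)
def pvB (M : Int) : List Int → Int
  | [] => 0
  | s :: t => if s = M then 1 + pvB M t.tail else pvB M t
termination_by l => l.length
decreasing_by
  · simp only [List.length_cons, List.length_tail]; omega
  · simp

-- remaining count of B's run-length pass, given the current run length
def pvG (M : Int) : List Int → Nat → Int
  | [], r => (((r + 1) / 2 : Nat) : Int)
  | s :: t, r => if s = M then pvG M t (r + 1) else (((r + 1) / 2 : Nat) : Int) + pvG M t 0

theorem pvFoldl_g (M : Int) (l : List Int) (c : Int) (r : Nat) :
    (l.foldl
        (fun st s => if s == M then (st.1, st.2 + 1)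
                     else (st.1 + (((st.2 + 1) / 2 : Nat) : Int), (0 : Nat)))
        (c, r)).1
      + ((((l.foldl
          (fun st s => if s == M then (st.1, st.2 + 1)
                       else (st.1 + (((st.2 + 1) / 2 : Nat) : Int), (0 : Nat)))
          (c, r)).2 + 1) / 2 : Nat) : Int)
      = c + pvG M l r := by
  induction l generalizing c r with
  | nil => simp [pvG]
  | cons s t ih =>
    simp only [List.foldl_cons, pvG]
    by_cases h : s = M
    · rw [if_pos (show (s == M) = true from by simp [h]), if_pos h, ih]
    · rw [if_neg (show ¬ (s == M) = true from by simp [h]), if_neg h, ih]; ring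

-- parity invariant: a run of length L contributes ⌈L/2⌉, independently of the rest
theorem pvG_parity (M : Int) (l : List Int) :
    ∀ k : Nat, pvG M l (2 * k) = (k : Int) + pvB M l ∧
      pvG M l (2 * k + 1) = (k : Int) + 1 + pvB M l.tail := by
  induction l with
  | nil =>
    intro k
    refine ⟨?_, ?_⟩ <;> simp only [pvG, pvB, List.tail_nil] <;> omega
  | cons s t ih =>
    intro k
    have h0 : pvG M t 0 = pvB M t := by simpa using (ih 0).1
    refine ⟨?_, ?_⟩
    · by_cases h : s = M
      · rw [pvG, if_pos h, (ih k).2, pvB, if_pos h]; ring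
      · rw [pvG, if_neg h, h0, pvB, if_neg h,
            show (2 * k + 1) / 2 = k from by omega]
    · by_cases h : s = M
      · rw [pvG, if_pos h, show 2 * k + 1 + 1 = 2 * (k + 1) from by ring,
            (ih (k + 1)).1, List.tail_cons]
        push_cast; ring
      · rw [pvG, if_neg h, h0, List.tail_cons,
            show (2 * k + 1 + 1) / 2 = k + 1 from by omega]
        push_cast; ring

-- pvSums facts
theorem pvSums_length (arr : List Int) : (pvSums arr).length = arr.length - 1 := by
  simp [pvSums]

theorem pvSums_getElem (arr : List Int) (i : Nat) (h : i < arr.length - 1) :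
    (pvSums arr)[i]'(by rw [pvSums_length]; omega) = arr.getD i 0 + arr.getD (i + 1) 0 := by
  simp [pvSums]

-- A's while loop equals the greedy on the dropped sums list
theorem pvCountA_eq_pvB (arr : List Int) (M : Int) :
    ∀ k i, arr.length - i ≤ k → pvCountA arr (some M) i = pvB M ((pvSums arr).drop i) := by
  intro k
  induction k with
  | zero =>
    intro i hk
    rw [pvCountA, dif_neg (by omega),
        List.drop_eq_nil_of_le (by rw [pvSums_length]; omega), pvB]
  | succ k ih =>
    intro i hk
    rw [pvCountA]
    by_cases h : i + 1 < arr.length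
    · have hi : i < (pvSums arr).length := by rw [pvSums_length]; omega
      have hdrop : (pvSums arr).drop i = (arr.getD i 0 + arr.getD (i + 1) 0) :: (pvSums arr).drop (i + 1) := by
        rw [List.drop_eq_getElem_cons hi, pvSums_getElem arr i (by omega)]
      rw [dif_pos h, hdrop]
      by_cases he : arr.getD i 0 + arr.getD (i + 1) 0 = M
      · rw [if_pos (by rw [he]), pvB, if_pos he, ih (i + 2) (by omega), List.tail_drop]
      · rw [if_neg (by simpa using he), pvB, if_neg he, ih (i + 1) (by omega)]
    · rw [dif_neg h,
          List.drop_eq_nil_of_le (by rw [pvSums_length]; omega), pvB]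

theorem pvCountA_none (arr : List Int) : ∀ k i, arr.length - i ≤ k → pvCountA arr none i = 0 := by
  intro k
  induction k with
  | zero => intro i hk; rw [pvCountA, dif_neg (by omega)]
  | succ k ih =>
    intro i hk
    rw [pvCountA]
    by_cases h : i + 1 < arr.length
    · rw [dif_pos h, if_neg (by simp)]
      exact ih (i + 1) (by omega)
    · rw [dif_neg h]

-- A's running strict-> fold over indices, once seeded, is the running List.foldl max of the sums
theorem pvFoldMax_some (arr : List Int) (l : List Nat) (a : Int) :
    l.foldl (fun acc i => match acc with
      | none => some (arr.getD i 0 + arr.getD (i + 1) 0)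
      | some m => if arr.getD i 0 + arr.getD (i + 1) 0 > m
                  then some (arr.getD i 0 + arr.getD (i + 1) 0) else acc) (some a)
      = some ((l.map (fun p => arr.getD p 0 + arr.getD (p + 1) 0)).foldl max a) := by
  induction l generalizing a with
  | nil => rfl
  | cons x t ih =>
    rw [List.foldl_cons]
    show List.foldl _ (if arr.getD x 0 + arr.getD (x + 1) 0 > a
        then some (arr.getD x 0 + arr.getD (x + 1) 0) else some a) t = _
    rw [List.map_cons, List.foldl_cons]
    by_cases h : arr.getD x 0 + arr.getD (x + 1) 0 > a
    · rw [if_pos h, ih, show max a (arr.getD x 0 + arr.getD (x + 1) 0) = arr.getD x 0 + arr.getD (x + 1) 0 from by omega]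
    · rw [if_neg h, ih, show max a (arr.getD x 0 + arr.getD (x + 1) 0) = a from by omega]

-- Source B's zip-built sums list is the index-form sums list
theorem pvZip_sums (arr : List Int) :
    List.zipWith (fun x y => x + y) arr (arr.drop 1) = pvSums arr := by
  apply List.ext_getElem
  · rw [pvSums_length, List.length_zipWith, List.length_drop]; omega
  · intro i h1 h2
    have hi : i < arr.length - 1 := by
      simpa [List.length_zipWith, List.length_drop] using h1
    rw [pvSums_getElem arr i hi]
    rw [List.getElem_zipWith]
    simp [List.getD_eq_getElem?_getD,
          List.getElem?_eq_getElem (by omega : i < arr.length),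
          List.getElem?_eq_getElem (by omega : i + 1 < arr.length)]

-- A's whole max_sum fold equals Python max() on the sums list
theorem pvMs_eq (arr : List Int) :
    (List.range (arr.length - 1)).foldl
      (fun acc i =>
        match acc with
        | none => some (arr.getD i 0 + arr.getD (i + 1) 0)
        | some m => if arr.getD i 0 + arr.getD (i + 1) 0 > m
                    then some (arr.getD i 0 + arr.getD (i + 1) 0) else acc) none
      = PySem.List.max? (pvSums arr) (fun y => y) := by
  cases hr : List.range (arr.length - 1) with
  | nil =>
    have hs : pvSums arr = [] := by rw [pvSums, hr, List.map_nil]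
    rw [hs, List.foldl_nil,
        (PySem.List.max?_eq_none_iff ([] : List Int) (fun y => y)).mpr rfl]
  | cons r0 rs =>
    have hs : pvSums arr = (arr.getD r0 0 + arr.getD (r0 + 1) 0) ::
        rs.map (fun p => arr.getD p 0 + arr.getD (p + 1) 0) := by
      rw [pvSums, hr, List.map_cons]
    rw [hs, List.foldl_cons, PySem.List.max?_id_cons]
    exact pvFoldMax_some arr rs (arr.getD r0 0 + arr.getD (r0 + 1) 0)

-- ===== VERDICT (by name: the statement is the Claim_ definition above) =====
theorem max_non_overlapping_pairs_spec : Claim_equal_max_non_overlapping_pairs := by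
  intro arr _
  unfold Spec_max_non_overlapping_pairs max_non_overlapping_pairs max_non_overlapping_pairs_alt
  simp only [pvZip_sums]
  rw [pvMs_eq]
  cases hm : PySem.List.max? (pvSums arr) (fun y => y) with
  | none =>
    exact pvCountA_none arr arr.length 0 (by omega)
  | some M =>
    have h1 : pvCountA arr (some M) 0 = pvB M (pvSums arr) := by
      simpa using pvCountA_eq_pvB arr M arr.length 0 (by omega)
    have h3 : pvG M (pvSums arr) 0 = pvB M (pvSums arr) := by
      simpa using (pvG_parity M (pvSums arr) 0).1
    dsimp only
    rw [h1, pvFoldl_g, zero_add, h3]
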